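-- pv_equiv track=rewrite | github.com/InetIntel/power-outages-scraping | worldwide/scrape_power_outage_live.py | find_outage_times
-- ===== SOURCE A (Python) =====
-- def find_outage_times(data):
--     times = dict()
--     date, state = data
--     for day in date.keys():
--         times[day] = dict()
--         times[day]["power_present"] = []
--         times[day]["no_power"] = []
--         times[day]["possible_shutdown"] = []
--         times[day]["no_info"] = []
--         hours, outages = date[day]
--         for i, outage in enumerate(outages):
--             if outage == "●":
--                 times[day]["power_present"].append(hours[i])
--             elif outage == "✕":
--                 times[day]["no_power"].append(hours[i])
--             if outage == "±":
--                 times[day]["possible_shutdown"].append(hours[i])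
--             if outage == "-":
--                 times[day]["no_info"].append(hours[i])
--     return times, state
-- ===== SOURCE B (Python) =====
-- CATEGORIES = (("\u25cf", "power_present"), ("\u2715", "no_power"),
--               ("\u00b1", "possible_shutdown"), ("-", "no_info"))
--
--
-- def find_outage_times(data):
--     date, state = data
--     # category-major: one pass per category over ALL days, giving a column dict
--     cols = {name: {day: [hours[i] for i, o in enumerate(outages) if o == sym]
--                    for day, (hours, outages) in date.items()}
--             for sym, name in CATEGORIES}
--     # transpose the columns back into the day-major structure
--     times = {day: {name: col[day] for name, col in cols.items()} for day in date}
--     return times, state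
-- ===== Notes on version B (the rewrite author's own statement) =====
-- stated objective: alternative
-- what changed: B interchanges the loop nesting: instead of A's day-major loop dispatching every symbol into one of four mutable buckets, B makes one category-major pass per symbol over all days (building four column dicts day->hours) and then transposes the columns into the day-major result.
import Mathlib
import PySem

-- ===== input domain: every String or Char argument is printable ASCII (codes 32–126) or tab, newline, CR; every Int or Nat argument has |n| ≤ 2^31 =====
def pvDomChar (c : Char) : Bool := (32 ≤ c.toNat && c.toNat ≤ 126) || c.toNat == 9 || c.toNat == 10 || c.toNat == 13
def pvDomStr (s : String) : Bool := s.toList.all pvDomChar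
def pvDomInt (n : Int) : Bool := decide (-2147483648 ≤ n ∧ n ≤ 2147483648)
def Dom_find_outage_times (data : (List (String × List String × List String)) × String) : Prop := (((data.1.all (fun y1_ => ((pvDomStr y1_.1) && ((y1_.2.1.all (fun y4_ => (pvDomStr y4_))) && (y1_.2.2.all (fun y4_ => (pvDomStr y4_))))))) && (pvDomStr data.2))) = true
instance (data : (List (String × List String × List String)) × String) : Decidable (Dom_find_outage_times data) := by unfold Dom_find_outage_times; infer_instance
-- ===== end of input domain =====

-- B interchanges the loop nesting: one category-major pass per symbol over all days (column dicts), then a transpose back to day-major; same cost, different traversal order.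


-- ===== PORT A =====
-- times[day]["<cat>"].append(hours[i]) : overwrite the bucket at its key in the inner dict (assoc list).
def pvAssocAppend (t : List (String × List String)) (k : String) (v : String) : List (String × List String) :=
  t.map (fun q => if q.1 = k then (q.1, q.2 ++ [v]) else q)

-- hours[i]: inside Pre_ the index is always in range; outside Pre_ Python raises IndexError (excluded).
def pvHoursAt (hours : List String) (i : Int) : String := (PySem.List.pyGet? hours i).getD ""

-- the inner loop of A: one pass over enumerate(outages), dispatching each symbol into its bucket
def pvStep (hours : List String) (t : List (String × List String)) (p : Int × String) : List (String × List String) :=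
  let t := if p.2 = "\u25cf" then pvAssocAppend t "power_present" (pvHoursAt hours p.1)
           else if p.2 = "\u2715" then pvAssocAppend t "no_power" (pvHoursAt hours p.1)
           else t
  let t := if p.2 = "\u00b1" then pvAssocAppend t "possible_shutdown" (pvHoursAt hours p.1) else t
  if p.2 = "-" then pvAssocAppend t "no_info" (pvHoursAt hours p.1) else t

def pvA_day (hours outages : List String) : List (String × List String) :=
  (PySem.List.enumerate outages).foldl (pvStep hours)
    [("power_present", []), ("no_power", []), ("possible_shutdown", []), ("no_info", [])]

-- date[day]: first match in the association list (dict lookup)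
def pvLookup (date : List (String × List String × List String)) (day : String) : List String × List String :=
  ((date.find? (fun q => q.1 == day)).map (·.2)).getD ([], [])

def find_outage_times (data : (List (String × List String × List String)) × String) : (List (String × List (String × List String))) × String :=
  let date := data.1
  let state := data.2
  -- for day in date.keys(): times[day] = … (keys are the distinct first components, insertion order)
  ((PySem.List.dedup (date.map (·.1))).foldl (fun times day =>
      let hv := pvLookup date day
      times ++ [(day, pvA_day hv.1 hv.2)]) [],
   state)

-- ===== PORT B =====
-- CATEGORIES: the fixed (symbol, name) table B iterates over
def pvCategories : List (String × String) :=
  [("●", "power_present"), ("✕", "no_power"), ("±", "possible_shutdown"), ("-", "no_info")]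

-- one category's hours for one day: [hours[i] for i, o in enumerate(outages) if o == sym]
def pvB_bucket (hours outages : List String) (sym : String) : List String :=
  ((PySem.List.enumerate outages).filter (fun p => p.2 == sym)).map (fun p => (PySem.List.pyGet? hours p.1).getD "")

-- cols: for each category, a column dict day -> that category's hours (category-major pass over all days)
def pvB_cols (date : List (String × List String × List String)) : List (String × List (String × List String)) :=
  pvCategories.map (fun c =>
    (c.2, (PySem.List.dedup (date.map (·.1))).map (fun day =>
        (day, pvB_bucket (pvLookup date day).1 (pvLookup date day).2 c.1))))

-- col[day]: dict lookup (first match) in a column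
def pvColAt (col : List (String × List String)) (day : String) : List String :=
  ((col.find? (fun q => q.1 == day)).map (·.2)).getD []

def find_outage_times_alt (data : (List (String × List String × List String)) × String) : (List (String × List (String × List String))) × String :=
  let date := data.1
  let state := data.2
  let cols := pvB_cols date
  -- transpose: {day: {name: col[day] for name, col in cols.items()} for day in date}
  ((PySem.List.dedup (date.map (·.1))).map (fun day =>
      (day, cols.map (fun nc => (nc.1, pvColAt nc.2 day)))),
   state)

-- ===== PRECONDITION & SPEC =====
-- Pre_ excludes exactly the inputs on which Python raises IndexError: some day whose outage list has a
-- recognised symbol ("●","✕","±","-") at a position ≥ len(hours) for that day's (first-match) entry.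
def pvDayOk (hours outages : List String) : Bool :=
  (PySem.List.enumerate outages).all (fun p =>
    !(p.2 == "●" || p.2 == "✕" || p.2 == "±" || p.2 == "-") || decide (p.1 < (hours.length : Int)))

def Pre_find_outage_times (data : (List (String × List String × List String)) × String) : Prop :=
  ∀ p ∈ data.1, data.1.find? (fun q => q.1 == p.1) = some p → pvDayOk p.2.1 p.2.2 = true
instance (data : (List (String × List String × List String)) × String) : Decidable (Pre_find_outage_times data) := by unfold Pre_find_outage_times; infer_instance

def pvWitness_find_outage_times : ((List (String × List String × List String)) × String) :=
  ([("d1", (["00", "01"], ["-", "x"]))], "ok")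

def Spec_find_outage_times (data : (List (String × List String × List String)) × String) (out : (List (String × List (String × List String))) × String) : Prop := out = find_outage_times_alt data
instance (data : (List (String × List String × List String)) × String) (out : (List (String × List (String × List String))) × String) : Decidable (Spec_find_outage_times data out) := by unfold Spec_find_outage_times; infer_instance

-- ===== CLAIM (what is proved, stated in full; the proofs are below) =====
def Claim_equal_find_outage_times : Prop := ∀ (data : (List (String × List String × List String)) × String), Dom_find_outage_times data → Pre_find_outage_times data → Spec_find_outage_times data (find_outage_times data)

-- ===== LEMMAS AND PROOFS =====

-- A's dispatch loop, started from arbitrary bucket contents, appends exactly the four filtered category passes.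
lemma pvA_loop_eq (hours : List String) (outages : List String) :
    ∀ (s : Int) (a b c d : List String),
      (PySem.List.enumerate outages s).foldl (pvStep hours)
        [("power_present", a), ("no_power", b), ("possible_shutdown", c), ("no_info", d)]
      = [("power_present", a ++ ((PySem.List.enumerate outages s).filter (fun p => p.2 == "●")).map (fun p => (PySem.List.pyGet? hours p.1).getD "")),
         ("no_power", b ++ ((PySem.List.enumerate outages s).filter (fun p => p.2 == "✕")).map (fun p => (PySem.List.pyGet? hours p.1).getD "")),
         ("possible_shutdown", c ++ ((PySem.List.enumerate outages s).filter (fun p => p.2 == "±")).map (fun p => (PySem.List.pyGet? hours p.1).getD "")),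
         ("no_info", d ++ ((PySem.List.enumerate outages s).filter (fun p => p.2 == "-")).map (fun p => (PySem.List.pyGet? hours p.1).getD ""))] := by
  induction outages with
  | nil => intro s a b c d; simp [PySem.List.enumerate_nil]
  | cons o os ih =>
    intro s a b c d
    rw [PySem.List.enumerate_cons, List.foldl_cons, List.filter_cons, List.filter_cons,
        List.filter_cons, List.filter_cons]
    by_cases h1 : o = "●"
    · subst h1
      rw [show pvStep hours [("power_present", a), ("no_power", b), ("possible_shutdown", c), ("no_info", d)] (s, "●")
            = [("power_present", a ++ [pvHoursAt hours s]), ("no_power", b), ("possible_shutdown", c), ("no_info", d)] from by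
            simp [pvStep, pvAssocAppend], ih]
      simp [pvHoursAt]
    · by_cases h2 : o = "✕"
      · subst h2
        rw [show pvStep hours [("power_present", a), ("no_power", b), ("possible_shutdown", c), ("no_info", d)] (s, "✕")
              = [("power_present", a), ("no_power", b ++ [pvHoursAt hours s]), ("possible_shutdown", c), ("no_info", d)] from by
              simp [pvStep, pvAssocAppend], ih]
        simp [pvHoursAt]
      · by_cases h3 : o = "±"
        · subst h3
          rw [show pvStep hours [("power_present", a), ("no_power", b), ("possible_shutdown", c), ("no_info", d)] (s, "±")
                = [("power_present", a), ("no_power", b), ("possible_shutdown", c ++ [pvHoursAt hours s]), ("no_info", d)] from by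
                simp [pvStep, pvAssocAppend], ih]
          simp [pvHoursAt]
        · by_cases h4 : o = "-"
          · subst h4
            rw [show pvStep hours [("power_present", a), ("no_power", b), ("possible_shutdown", c), ("no_info", d)] (s, "-")
                  = [("power_present", a), ("no_power", b), ("possible_shutdown", c), ("no_info", d ++ [pvHoursAt hours s])] from by
                  simp [pvStep, pvAssocAppend], ih]
            simp [pvHoursAt]
          · rw [show pvStep hours [("power_present", a), ("no_power", b), ("possible_shutdown", c), ("no_info", d)] (s, o)
                  = [("power_present", a), ("no_power", b), ("possible_shutdown", c), ("no_info", d)] from by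
                  simp [pvStep, h1, h2, h3, h4], ih]
            simp [h1, h2, h3, h4]

-- hence one day of A equals the four category passes of B, in B's (symbol, name) table order
lemma pv_day_eq (hours outages : List String) :
    pvA_day hours outages = pvCategories.map (fun c => (c.2, pvB_bucket hours outages c.1)) := by
  simpa [pvCategories, pvB_bucket] using pvA_loop_eq hours outages 0 [] [] [] []

lemma pv_find_map {α : Type} (keys : List String) (f : String → α) (day : String)
    (h : day ∈ keys) :
    ((keys.map (fun d => (d, f d))).find? (fun q => q.1 == day)) = some (day, f day) := by
  induction keys with
  | nil => cases h
  | cons k ks ih =>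
    by_cases hk : k = day
    · subst hk; simp
    · have : day ∈ ks := by
        rcases List.mem_cons.mp h with h' | h'
        · exact absurd h'.symm hk
        · exact h'
      simp [hk, ih this]

-- ===== VERDICT (by name: the statement is the Claim_ definition above) =====
theorem find_outage_times_spec : Claim_equal_find_outage_times := by
  intro data _ _
  show find_outage_times data = find_outage_times_alt data
  simp only [find_outage_times, find_outage_times_alt]
  rw [PySem.List.foldl_append_singleton_eq_map]
  refine congrArg (fun t => (t, data.2)) ?_
  apply List.map_congr_left
  intro day hday
  refine congrArg (fun r => (day, r)) ?_
  rw [pv_day_eq]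
  simp only [pvB_cols, List.map_map]
  apply List.map_congr_left
  intro c _
  simp only [Function.comp, pvColAt,
    pv_find_map (PySem.List.dedup (data.1.map (·.1)))
      (fun day => pvB_bucket (pvLookup data.1 day).1 (pvLookup data.1 day).2 c.1) day hday]
  simp
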